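-- pv_equiv track=rewrite | github.com/uriyah92/math_games | math_games.py | compare_2d_lists
-- ===== SOURCE A (Python) =====
-- import typing
--
-- def compare_1d_lists(l1: typing.List[int], l2: typing.List[int]) -> bool:
--     if len(l1) != len(l2):
--         return False
--     if len(l1) == 0:
--         return True
--     if l1[0] == l2[0]:
--         return compare_1d_lists(l1[1:], l2[1:])
--     else:
--         return False
--
-- def compare_2d_lists(l1: typing.List[typing.List[int]],
--                      l2: typing.List[typing.List[int]]) -> bool:
--     if len(l1) != len(l2):
--         return False
--     if len(l1) == 0:
--         return True
--     if compare_1d_lists(l1[0], l2[0]):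
--
--         return compare_2d_lists(l1[1:], l2[1:])
--     else:
--         return False
-- ===== SOURCE B (Python) =====
-- def compare_2d_lists(l1, l2):
--     if len(l1) != len(l2):
--         return False
--     for r1, r2 in zip(l1, l2):
--         if r1 != r2:
--             return False
--     return True
-- ===== Notes on version B (the rewrite author's own statement) =====
-- stated objective: simpler
-- what changed: Replaced the two-level recursion with its slice copies and a 1-D helper by a single iterative pass that zips the rows and compares each pair with built-in list equality.
import Mathlib
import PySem

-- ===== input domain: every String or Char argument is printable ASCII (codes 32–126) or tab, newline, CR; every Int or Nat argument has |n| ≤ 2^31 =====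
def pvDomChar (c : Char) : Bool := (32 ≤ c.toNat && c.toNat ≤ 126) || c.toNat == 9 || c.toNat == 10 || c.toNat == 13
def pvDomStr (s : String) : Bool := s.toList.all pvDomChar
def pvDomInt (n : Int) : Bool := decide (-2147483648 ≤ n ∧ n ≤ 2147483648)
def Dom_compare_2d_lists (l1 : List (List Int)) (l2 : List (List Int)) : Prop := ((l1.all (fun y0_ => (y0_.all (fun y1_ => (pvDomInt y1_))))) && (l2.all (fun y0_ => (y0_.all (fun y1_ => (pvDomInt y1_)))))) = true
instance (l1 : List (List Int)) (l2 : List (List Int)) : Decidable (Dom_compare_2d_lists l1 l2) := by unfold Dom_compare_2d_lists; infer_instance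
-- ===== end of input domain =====

-- ===== PORT A =====
-- B replaces A's two-level recursion and 1-D helper by one iterative zip pass with built-in row equality; objective: simpler.
def compare_1d_lists (l1 : List Int) (l2 : List Int) : Bool :=
  if l1.length != l2.length then false
  else match l1, l2 with
    | [], _ => true
    | a :: t1, b :: t2 => if a == b then compare_1d_lists t1 t2 else false
    | _ :: _, [] => false

def compare_2d_lists (l1 : List (List Int)) (l2 : List (List Int)) : Bool :=
  if l1.length != l2.length then false
  else match l1, l2 with
    | [], _ => true
    | r1 :: t1, r2 :: t2 =>
      if compare_1d_lists r1 r2 then compare_2d_lists t1 t2 else false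
    | _ :: _, [] => false

-- ===== PORT B =====
def compare_2d_lists_alt (l1 : List (List Int)) (l2 : List (List Int)) : Bool :=
  if l1.length != l2.length then false
  else (l1.zip l2).all (fun p => p.1 == p.2)

-- ===== PRECONDITION & SPEC =====
def Spec_compare_2d_lists (l1 : List (List Int)) (l2 : List (List Int)) (out : Bool) : Prop := out = compare_2d_lists_alt l1 l2
instance (l1 : List (List Int)) (l2 : List (List Int)) (out : Bool) : Decidable (Spec_compare_2d_lists l1 l2 out) := by unfold Spec_compare_2d_lists; infer_instance

-- ===== CLAIM =====
def Claim_equal_compare_2d_lists : Prop := ∀ (l1 : List (List Int)) (l2 : List (List Int)), Dom_compare_2d_lists l1 l2 → Spec_compare_2d_lists l1 l2 (compare_2d_lists l1 l2)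

-- ===== LEMMAS AND PROOFS =====
theorem compare_1d_eq (l1 l2 : List Int) : compare_1d_lists l1 l2 = (l1 == l2) := by
  induction l1 generalizing l2 with
  | nil => cases l2 <;> simp [compare_1d_lists]
  | cons a t1 ih =>
    cases l2 with
    | nil => simp [compare_1d_lists]
    | cons b t2 =>
      simp only [compare_1d_lists, List.cons_beq_cons]
      by_cases hl : t1.length = t2.length
      · by_cases hab : a = b <;> simp [hl, hab, ih]
      · have hne : t1 ≠ t2 := fun h => hl (congrArg List.length h)
        simp [hl, hne]

theorem compare_2d_eq (l1 l2 : List (List Int)) : compare_2d_lists l1 l2 = (l1 == l2) := by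
  induction l1 generalizing l2 with
  | nil => cases l2 <;> simp [compare_2d_lists]
  | cons r1 t1 ih =>
    cases l2 with
    | nil => simp [compare_2d_lists]
    | cons r2 t2 =>
      simp only [compare_2d_lists, List.cons_beq_cons, compare_1d_eq]
      by_cases hl : t1.length = t2.length
      · by_cases hr : r1 = r2 <;> simp [hl, hr, ih]
      · have hne : t1 ≠ t2 := fun h => hl (congrArg List.length h)
        simp [hl, hne]

theorem zip_all_eq (t1 t2 : List (List Int)) (h : t1.length = t2.length) :
    ((t1.zip t2).all fun p => p.1 == p.2) = (t1 == t2) := by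
  induction t1 generalizing t2 with
  | nil => cases t2 with
    | nil => simp
    | cons b bs => simp at h
  | cons a as ih =>
    cases t2 with
    | nil => simp at h
    | cons b bs =>
      simp only [List.length_cons, Nat.add_right_cancel_iff] at h
      simp only [List.zip_cons_cons, List.all_cons, List.cons_beq_cons]
      rw [ih bs h]

theorem alt_eq (l1 l2 : List (List Int)) : compare_2d_lists_alt l1 l2 = (l1 == l2) := by
  unfold compare_2d_lists_alt
  by_cases hl : l1.length = l2.length
  · simp [hl, zip_all_eq l1 l2 hl]
  · have hne : l1 ≠ l2 := fun h => hl (congrArg List.length h)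
    simp [hl, hne]

-- ===== VERDICT =====
theorem compare_2d_lists_spec : Claim_equal_compare_2d_lists := by
  intro l1 l2 _
  unfold Spec_compare_2d_lists
  rw [compare_2d_eq, alt_eq]
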